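-- pv_equiv track=rewrite | github.com/pahanini/aoc | 2021/10.py | pzl
-- ===== SOURCE A (Python) =====
-- def pzl(chs) -> (int, int):
--     p1 = 0
--     p2 = []
--     opn = "([{<"
--     cls = ")]}>"
--     score1 = (3, 57, 1197, 25137)
--     for ch in chs:
--         st = []
--         for c in ch:
--             if c in opn:
--                 st.append(c)
--                 continue
--             p = st.pop()
--             i = cls.index(c)
--             if opn.index(p) != i:
--                 p1 += score1[i]
--                 break
--         else:
--             st.reverse()
--             t = 0
--             for p in st:
--                 t = t * 5 + opn.index(p) + 1
--             p2.append(t)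
--     p2.sort()
--     return p1, p2[len(p2)//2]
-- ===== SOURCE B (Python) =====
-- ILLEGAL = {')': 3, ']': 57, '}': 1197, '>': 25137}
-- OPEN_VAL = {'(': 1, '[': 2, '{': 3, '<': 4}
-- CLOSERS = ")]}>"
-- PAIRS2 = ("()", "[]", "{}", "<>")
--
--
-- def reduce_line(line):
--     """Rewrite the line to a normal form by repeatedly deleting one adjacent
--     matched bracket pair; deleting a matched pair never changes the first
--     illegal closer or the leftover openers, so the normal form carries both."""
--     while True:
--         for p in PAIRS2:
--             i = line.find(p)
--             if i >= 0:
--                 line = line[:i] + line[i + 2:]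
--                 break
--         else:
--             return line
--
--
-- def pzl(chs) -> (int, int):
--     p1 = 0
--     p2 = []
--     for ch in chs:
--         r = reduce_line(ch)
--         bad = next((c for c in r if c in CLOSERS), None)
--         if bad is not None:
--             p1 += ILLEGAL[bad]
--         else:
--             t = 0
--             for c in reversed(r):
--                 t = t * 5 + OPEN_VAL[c]
--             p2.append(t)
--     p2.sort()
--     return p1, p2[len(p2) // 2]
-- ===== Notes on version B (the rewrite author's own statement) =====
-- stated objective: alternative
-- what changed: A's fused stack scan (push openers, pop-and-compare on each closer, break on first mismatch) is replaced by pair-elimination rewriting: each line is reduced to a normal form by repeatedly deleting one adjacent matched bracket pair, and both scores are read off the normal form (its first closing char is the line's illegal char; an all-opener residue is the leftover stack, folded top-first into the completion score); …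
import Mathlib
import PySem

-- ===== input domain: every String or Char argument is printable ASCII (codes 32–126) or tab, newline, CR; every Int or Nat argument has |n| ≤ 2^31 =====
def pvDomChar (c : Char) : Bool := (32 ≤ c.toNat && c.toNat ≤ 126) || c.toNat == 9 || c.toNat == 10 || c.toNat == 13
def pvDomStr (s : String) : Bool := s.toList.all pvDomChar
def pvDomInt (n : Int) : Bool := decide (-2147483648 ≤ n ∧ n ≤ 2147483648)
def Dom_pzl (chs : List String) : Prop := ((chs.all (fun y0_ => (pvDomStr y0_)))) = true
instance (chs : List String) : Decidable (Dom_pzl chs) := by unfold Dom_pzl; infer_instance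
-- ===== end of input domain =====

-- B replaces A's stack scan by pair-elimination rewriting: each line is reduced to a normal
-- form by repeatedly deleting one adjacent matched bracket pair, and both scores are read
-- off the normal form (first closer = illegal char; all-opener residue = leftover stack).
-- Same asymptotic work is not claimed; objective: alternative algorithm.

-- ===== PORT A =====
def pvOpn : List Char := ['(', '[', '{', '<']
def pvCls : List Char := [')', ']', '}', '>']
def pvScore1 : List Int := [3, 57, 1197, 25137]

-- s.index(c) of A; A only reaches it where the char is present (Pre_), .getD 0 elsewhere
def pvIdx (l : List Char) (c : Char) : Int := ((PySem.List.index? l c).getD 0 : Nat)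

-- A's inner for-else loop over one line; the Lean list st is the Python stack with the TOP
-- AT THE HEAD (Python appends/pops at the end), so Python's st.reverse() + iterate is
-- iterating this list as is.  Sum.inl s = break taken with score1[i] = s; Sum.inr st = else branch.
def pzlScan : List Char → List Char → Int ⊕ List Char
  | [], st => Sum.inr st
  | c :: r, st =>
    if c ∈ pvOpn then pzlScan r (c :: st)
    else
      -- st.pop() raises IndexError on an empty stack, cls.index(c) ValueError if c is no
      -- closer: both outside Pre_, defaults here
      let p := st.headD ' '
      let i := pvIdx pvCls c
      if pvIdx pvOpn p ≠ i then Sum.inl ((PySem.List.pyGet? pvScore1 i).getD 0)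
      else pzlScan r st.tail

def pzl (chs : List String) : Int × Int :=
  let acc := chs.foldl (fun (acc : Int × List Int) ch =>
      match pzlScan ch.toList [] with
      | Sum.inl s => (acc.1 + s, acc.2)
      | Sum.inr st => (acc.1, acc.2 ++ [st.foldl (fun t p => t * 5 + pvIdx pvOpn p + 1) 0]))
    (0, [])
  let p2 := PySem.List.sorted acc.2 id
  -- p2[len(p2)//2] raises IndexError on an empty p2: outside Pre_, default here
  (acc.1, (PySem.List.pyGet? p2 (PySem.Int.floordiv p2.length 2)).getD 0)

-- ===== PORT B =====
def pvIllegal : PySem.Dict Char Int := PySem.Dict.ofList [(')', 3), (']', 57), ('}', 1197), ('>', 25137)]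
def pvOpenVal : PySem.Dict Char Int := PySem.Dict.ofList [('(', 1), ('[', 2), ('{', 3), ('<', 4)]
def pvClosersB : List Char := [')', ']', '}', '>']

-- line.find(pd) for a two-character needle, over the character list
def findSub2 (p d : Char) : List Char → Option Nat
  | a :: b :: r => if a = p ∧ b = d then some 0 else (findSub2 p d (b :: r)).map (· + 1)
  | _ => none

-- line[:i] + line[i+2:]
def removeAt2 (cs : List Char) (i : Nat) : List Char := cs.take i ++ cs.drop (i + 2)

-- one iteration of Source B's for-loop over the four pair strings: first pair type found is removed
def tryRemove (cs : List Char) : Option (List Char) :=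
  match findSub2 '(' ')' cs with
  | some i => some (removeAt2 cs i)
  | none => match findSub2 '[' ']' cs with
    | some i => some (removeAt2 cs i)
    | none => match findSub2 '{' '}' cs with
      | some i => some (removeAt2 cs i)
      | none => match findSub2 '<' '>' cs with
        | some i => some (removeAt2 cs i)
        | none => none

-- used only for the port's termination (the while loop strictly shrinks the line)
theorem findSub2_decomp (p d : Char) : ∀ (cs : List Char) (i : Nat), findSub2 p d cs = some i →
    ∃ xs ys, cs = xs ++ p :: d :: ys ∧ removeAt2 cs i = xs ++ ys
  | a :: b :: r, i => by
    intro h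
    by_cases hab : a = p ∧ b = d
    · simp only [findSub2, if_pos hab, Option.some.injEq] at h
      exact ⟨[], r, by simp [hab.1, hab.2], by simp [removeAt2, ← h]⟩
    · simp only [findSub2, if_neg hab, Option.map_eq_some_iff] at h
      obtain ⟨j, hj, hij⟩ := h
      obtain ⟨xs, ys, hdec, hrem⟩ := findSub2_decomp p d (b :: r) j hj
      refine ⟨a :: xs, ys, by simp [hdec], ?_⟩
      subst hij
      simp only [removeAt2, List.take_succ_cons, List.drop_succ_cons] at hrem ⊢
      simp [hrem]
  | [], i => by intro h; simp [findSub2] at h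
  | [a], i => by intro h; simp [findSub2] at h

theorem tryRemove_length (cs cs' : List Char) (h : tryRemove cs = some cs') :
    cs'.length < cs.length := by
  unfold tryRemove at h
  repeat' split at h
  all_goals first
    | (rename_i i hfind
       obtain ⟨xs, ys, hdec, hrem⟩ := findSub2_decomp _ _ _ _ hfind
       obtain rfl : cs' = xs ++ ys := by injection h with h'; exact h'.symm.trans hrem
       subst hdec
       simp)
    | simp at h

-- Source B reduce_line: the while-loop removing one adjacent matched pair per iteration
def reduceLine (cs : List Char) : List Char :=
  match h : tryRemove cs with
  | some cs' => reduceLine cs'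
  | none => cs
termination_by cs.length
decreasing_by exact tryRemove_length _ _ h

def pzl_alt (chs : List String) : Int × Int :=
  let acc := chs.foldl (fun (acc : Int × List Int) ch =>
      let r := reduceLine ch.toList
      -- bad = next((c for c in r if c in CLOSERS), None)
      match r.find? (fun c => decide (c ∈ pvClosersB)) with
      | some bad => (acc.1 + (pvIllegal.get? bad).getD 0, acc.2)
      | none => (acc.1, acc.2 ++ [r.reverse.foldl (fun t c => t * 5 + (pvOpenVal.get? c).getD 0) 0]))
    (0, [])
  let p2 := PySem.List.sorted acc.2 id
  (acc.1, (PySem.List.pyGet? p2 (PySem.Int.floordiv p2.length 2)).getD 0)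

-- ===== PRECONDITION & SPEC =====
-- Pre_ excludes exactly the inputs on which A raises: a line that pops an empty stack or
-- reaches a non-bracket character before any corruption break (IndexError/ValueError), or
-- an input in which every line breaks as corrupt, so p2 is empty and p2[len(p2)//2] raises.

-- the closer matching an opener (shape spec only; no scores, no break bookkeeping)
def pvCloseOf (c : Char) : Option Char :=
  if c = '(' then some ')' else if c = '[' then some ']'
  else if c = '{' then some '}' else if c = '<' then some '>' else none

-- the line, read against a stack of EXPECTED CLOSERS, never pops empty nor hits a
-- non-bracket char before its first mismatched closer (i.e. A returns on this line)
def pvLineSafe : List Char → List Char → Bool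
  | [], _ => true
  | c :: r, st =>
    match pvCloseOf c with
    | some d => pvLineSafe r (d :: st)
    | none =>
      match st with
      | [] => false
      | d :: st' =>
        if c = ')' ∨ c = ']' ∨ c = '}' ∨ c = '>' then
          (if c = d then pvLineSafe r st' else true)
        else false

-- the line is a valid prefix of a balanced bracket sequence (A appends it to p2)
def pvLineClean : List Char → List Char → Bool
  | [], _ => true
  | c :: r, st =>
    match pvCloseOf c with
    | some d => pvLineClean r (d :: st)
    | none =>
      match st with
      | [] => false
      | d :: st' => c = d && pvLineClean r st'

def Pre_pzl (chs : List String) : Prop :=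
  (∀ ch ∈ chs, pvLineSafe ch.toList [] = true) ∧ (∃ ch ∈ chs, pvLineClean ch.toList [] = true)

instance (chs : List String) : Decidable (Pre_pzl chs) := by unfold Pre_pzl; infer_instance

def pvWitness_pzl : List String := ["(]", "<{}"]

def Spec_pzl (chs : List String) (out : Int × Int) : Prop := out = pzl_alt chs
instance (chs : List String) (out : Int × Int) : Decidable (Spec_pzl chs out) := by unfold Spec_pzl; infer_instance

-- ===== CLAIM (what is proved, stated in full; the proofs are below) =====
def Claim_equal_pzl : Prop := ∀ (chs : List String), Dom_pzl chs → Pre_pzl chs → Spec_pzl chs (pzl chs)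

-- ===== LEMMAS AND PROOFS =====

theorem closeOf_cases (p d : Char) (h : pvCloseOf p = some d) :
    (p = '(' ∧ d = ')') ∨ (p = '[' ∧ d = ']') ∨ (p = '{' ∧ d = '}') ∨ (p = '<' ∧ d = '>') := by
  unfold pvCloseOf at h
  split_ifs at h with h1 h2 h3 h4 <;> simp_all <;> exact h.symm

theorem closeOf_isSome_iff (p : Char) :
    (pvCloseOf p).isSome = true ↔ (p = '(' ∨ p = '[' ∨ p = '{' ∨ p = '<') := by
  unfold pvCloseOf
  split_ifs with h1 h2 h3 h4 <;> simp_all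

theorem mem_opn_iff (c : Char) : (c ∈ pvOpn) ↔ (pvCloseOf c).isSome = true := by
  rw [closeOf_isSome_iff]; simp [pvOpn]

theorem idx_eq_iff (p c : Char) (hp : (pvCloseOf p).isSome = true)
    (hc : c = ')' ∨ c = ']' ∨ c = '}' ∨ c = '>') :
    (pvIdx pvOpn p = pvIdx pvCls c) ↔ ((pvCloseOf p).getD ' ' = c) := by
  rw [closeOf_isSome_iff] at hp
  rcases hp with h | h | h | h <;> rcases hc with h' | h' | h' | h' <;> subst h <;> subst h' <;> decide

theorem score_eq (c : Char) (hc : c = ')' ∨ c = ']' ∨ c = '}' ∨ c = '>') :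
    (PySem.List.pyGet? pvScore1 (pvIdx pvCls c)).getD 0 = (pvIllegal.get? c).getD 0 := by
  rcases hc with h | h | h | h <;> subst h <;> decide

theorem openval_eq (p : Char) (hp : (pvCloseOf p).isSome = true) :
    pvIdx pvOpn p + 1 = (pvOpenVal.get? p).getD 0 := by
  rw [closeOf_isSome_iff] at hp
  rcases hp with h | h | h | h <;> subst h <;> decide

-- no adjacent opener immediately followed by its matching closer
def pairFreeB : List Char → Bool
  | a :: b :: r => !(pvCloseOf a = some b : Bool) && pairFreeB (b :: r)
  | _ => true

-- deleting an adjacent matched pair never changes A's inner loop result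
theorem scan_removePair (p d : Char) (hpd : pvCloseOf p = some d) :
    ∀ (xs ys st : List Char), pzlScan (xs ++ p :: d :: ys) st = pzlScan (xs ++ ys) st := by
  intro xs
  induction xs with
  | nil =>
    intro ys st
    have hp : p ∈ pvOpn := (mem_opn_iff p).mpr (by simp [hpd])
    have hd : d ∉ pvOpn := by
      rcases closeOf_cases p d hpd with ⟨_, h⟩ | ⟨_, h⟩ | ⟨_, h⟩ | ⟨_, h⟩ <;> subst h <;> decide
    have hidx : ¬ pvIdx pvOpn p ≠ pvIdx pvCls d := by
      rcases closeOf_cases p d hpd with ⟨h1, h2⟩ | ⟨h1, h2⟩ | ⟨h1, h2⟩ | ⟨h1, h2⟩ <;>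
        subst h1 <;> subst h2 <;> decide
    simp [pzlScan, hp, hd, hidx]
  | cons a xs ih =>
    intro ys st
    simp only [List.cons_append, pzlScan]
    by_cases ha : a ∈ pvOpn
    · simp [ha, ih]
    · simp only [ha, if_false]
      split
      · rfl
      · exact ih ys st.tail

-- deleting an adjacent matched pair never changes whether A raises on the line
theorem safe_removePair (p d : Char) (hpd : pvCloseOf p = some d) :
    ∀ (xs ys st : List Char), pvLineSafe (xs ++ p :: d :: ys) st = pvLineSafe (xs ++ ys) st := by
  intro xs
  induction xs with
  | nil =>
    intro ys st
    have hdn : pvCloseOf d = none := by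
      rcases closeOf_cases p d hpd with ⟨_, h⟩ | ⟨_, h⟩ | ⟨_, h⟩ | ⟨_, h⟩ <;> subst h <;> decide
    have hdc : d = ')' ∨ d = ']' ∨ d = '}' ∨ d = '>' := by
      rcases closeOf_cases p d hpd with ⟨_, h⟩ | ⟨_, h⟩ | ⟨_, h⟩ | ⟨_, h⟩ <;> subst h <;> simp
    simp [pvLineSafe, hpd, hdn, hdc]
  | cons a xs ih =>
    intro ys st
    simp only [List.cons_append, pvLineSafe]
    split
    · exact ih ys _
    · split
      · rfl
      · split
        · split
          · exact ih ys _
          · rfl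
        · rfl

-- one reduction step, as the removal of one adjacent matched pair
theorem tryRemove_some_shape (cs cs' : List Char) (h : tryRemove cs = some cs') :
    ∃ p d xs ys, pvCloseOf p = some d ∧ cs = xs ++ p :: d :: ys ∧ cs' = xs ++ ys := by
  unfold tryRemove at h
  repeat' split at h
  all_goals first
    | (rename_i i hfind
       obtain ⟨xs, ys, hdec, hrem⟩ := findSub2_decomp _ _ _ _ hfind
       obtain rfl : cs' = xs ++ ys := by injection h with h'; exact h'.symm.trans hrem
       refine ⟨_, _, xs, ys, ?_, hdec, rfl⟩
       decide)
    | simp at h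

theorem findSub2_none_head (p d a b : Char) (r : List Char)
    (h : findSub2 p d (a :: b :: r) = none) : ¬ (a = p ∧ b = d) ∧ findSub2 p d (b :: r) = none := by
  by_cases hab : a = p ∧ b = d
  · simp [findSub2, hab] at h
  · simp only [findSub2, if_neg hab, Option.map_eq_none_iff] at h
    exact ⟨hab, h⟩

-- at the fixpoint no adjacent matched pair remains
theorem tryRemove_none_pairFree : ∀ (cs : List Char), tryRemove cs = none → pairFreeB cs = true := by
  have key : ∀ cs : List Char,
      findSub2 '(' ')' cs = none → findSub2 '[' ']' cs = none →
      findSub2 '{' '}' cs = none → findSub2 '<' '>' cs = none → pairFreeB cs = true := by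
    intro cs
    induction cs with
    | nil => intro _ _ _ _; rfl
    | cons a r ih =>
      cases r with
      | nil => intro _ _ _ _; rfl
      | cons b r' =>
        intro h1 h2 h3 h4
        obtain ⟨n1, t1⟩ := findSub2_none_head _ _ _ _ _ h1
        obtain ⟨n2, t2⟩ := findSub2_none_head _ _ _ _ _ h2
        obtain ⟨n3, t3⟩ := findSub2_none_head _ _ _ _ _ h3
        obtain ⟨n4, t4⟩ := findSub2_none_head _ _ _ _ _ h4
        have hnp : ¬ (pvCloseOf a = some b) := by
          intro hab
          rcases closeOf_cases a b hab with ⟨ha, hb⟩ | ⟨ha, hb⟩ | ⟨ha, hb⟩ | ⟨ha, hb⟩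
          · exact n1 ⟨ha, hb⟩
          · exact n2 ⟨ha, hb⟩
          · exact n3 ⟨ha, hb⟩
          · exact n4 ⟨ha, hb⟩
        simpa [pairFreeB, hnp] using ih t1 t2 t3 t4
  intro cs h
  unfold tryRemove at h
  apply key <;> · repeat' split at h
                  all_goals simp_all
theorem pairFreeB_tail (a : Char) (r : List Char) (h : pairFreeB (a :: r) = true) :
    pairFreeB r = true := by
  cases r with
  | nil => rfl
  | cons b r' =>
    have h' := h
    simp only [pairFreeB, Bool.and_eq_true] at h'
    exact h'.2

theorem pairFreeB_head (a b : Char) (r : List Char) (h : pairFreeB (a :: b :: r) = true) :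
    ¬ (pvCloseOf a = some b) := by
  simp [pairFreeB, Bool.and_eq_true] at h
  exact h.1

-- the reduction preserves both A's inner-loop result and A's safety on the line
theorem reduceLine_invariant : ∀ (cs : List Char),
    (∀ st, pzlScan (reduceLine cs) st = pzlScan cs st)
    ∧ (∀ st, pvLineSafe (reduceLine cs) st = pvLineSafe cs st) := by
  intro cs
  induction cs using reduceLine.induct with
  | case1 cs cs' h ih =>
    obtain ⟨p, d, xs, ys, hpd, hcs, hcs'⟩ := tryRemove_some_shape cs cs' h
    have hred : reduceLine cs = reduceLine cs' := by
      rw [reduceLine]; split <;> simp_all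
    constructor
    · intro st
      rw [hred, (ih).1 st, hcs', hcs, scan_removePair p d hpd]
    · intro st
      rw [hred, (ih).2 st, hcs', hcs, safe_removePair p d hpd]
  | case2 cs h =>
    have hred : reduceLine cs = cs := by rw [reduceLine]; split <;> simp_all
    exact ⟨fun st => by rw [hred], fun st => by rw [hred]⟩

theorem reduceLine_pairFree (cs : List Char) : pairFreeB (reduceLine cs) = true := by
  induction cs using reduceLine.induct with
  | case1 cs cs' h ih =>
    have hred : reduceLine cs = reduceLine cs' := by rw [reduceLine]; split <;> simp_all
    rw [hred]; exact ih
  | case2 cs h =>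
    have hred : reduceLine cs = cs := by rw [reduceLine]; split <;> simp_all
    rw [hred]; exact tryRemove_none_pairFree cs h

-- a safe line with no closer consists of openers only
theorem noCloser_allOpen : ∀ (R st : List Char),
    pvLineSafe R st = true → (∀ x ∈ R, ¬ x ∈ pvClosersB) →
    ∀ c ∈ R, (pvCloseOf c).isSome = true := by
  intro R
  induction R with
  | nil => simp
  | cons a r ih =>
    intro st hsafe hno c hc
    rw [pvLineSafe.eq_def] at hsafe
    simp only at hsafe
    split at hsafe
    · rename_i d hd
      rcases List.mem_cons.mp hc with rfl | hcr
      · simp [hd]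
      · exact ih _ hsafe (fun x hx => hno x (List.mem_cons_of_mem _ hx)) c hcr
    · rename_i hnone
      split at hsafe
      · exact absurd hsafe (by simp)
      · split at hsafe
        · rename_i hcl
          exact absurd (show a ∈ pvClosersB by
            rcases hcl with h | h | h | h <;> subst h <;> decide) (hno a List.mem_cons_self)
        · exact absurd hsafe (by simp)

-- boundary: the next char never matches the expected closer of the stack top
def pvBoundary (st R : List Char) : Prop :=
  match st, R with
  | p :: _, c :: _ => ¬ (pvCloseOf p = some c)
  | _, _ => True

-- A's inner loop, read off a pair-free safe line: the first closer is the break char,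
-- and with no closer the whole line is the leftover stack
theorem fixChar : ∀ (R st : List Char), pairFreeB R = true →
    (∀ p ∈ st, (pvCloseOf p).isSome = true) →
    pvLineSafe R (st.map (fun p => (pvCloseOf p).getD ' ')) = true →
    pvBoundary st R →
    pzlScan R st = match R.find? (fun c => decide (c ∈ pvClosersB)) with
      | some c => Sum.inl ((PySem.List.pyGet? pvScore1 (pvIdx pvCls c)).getD 0)
      | none => Sum.inr (R.reverse ++ st) := by
  intro R
  induction R with
  | nil => intro st _ _ _ _; simp [pzlScan]
  | cons c r ih =>
    intro st hpf hst hsafe hb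
    by_cases hc : (pvCloseOf c).isSome = true
    · obtain ⟨d, hd⟩ := Option.isSome_iff_exists.mp hc
      have hmem : c ∈ pvOpn := (mem_opn_iff c).mpr hc
      have hccl : ¬ (decide (c ∈ pvClosersB) = true) := by
        rcases closeOf_cases c d hd with ⟨h, _⟩ | ⟨h, _⟩ | ⟨h, _⟩ | ⟨h, _⟩ <;> subst h <;> decide
      have hsafe' : pvLineSafe r ((c :: st).map (fun p => (pvCloseOf p).getD ' ')) = true := by
        rw [pvLineSafe.eq_def] at hsafe
        simp only [hd] at hsafe
        simpa [hd] using hsafe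
      have hst' : ∀ p ∈ c :: st, (pvCloseOf p).isSome = true := by
        intro p hp
        rcases List.mem_cons.mp hp with rfl | hp
        · exact hc
        · exact hst p hp
      have hb' : pvBoundary (c :: st) r := by
        cases r with
        | nil => trivial
        | cons e r' => exact pairFreeB_head c e r' hpf
      have := ih (c :: st) (pairFreeB_tail _ _ hpf) hst' hsafe' hb'
      rw [pzlScan, if_pos hmem, this]
      rw [List.find?_cons_of_neg (by simpa using hccl)]
      cases r.find? (fun c => decide (c ∈ pvClosersB)) <;> simp
    · have hnone : pvCloseOf c = none := Option.not_isSome_iff_eq_none.mp hc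
      have hmem : c ∉ pvOpn := fun h => hc ((mem_opn_iff c).mp h)
      rw [pvLineSafe.eq_def] at hsafe
      simp only [hnone] at hsafe
      cases st with
      | nil => simp at hsafe
      | cons p st' =>
        simp only [List.map_cons] at hsafe
        have hp : (pvCloseOf p).isSome = true := hst p List.mem_cons_self
        split at hsafe
        · rename_i hcl
          have hmismatch : (pvCloseOf p).getD ' ' ≠ c := by
            intro heq
            obtain ⟨d, hd⟩ := Option.isSome_iff_exists.mp hp
            exact hb (by rw [hd]; simp [hd] at heq; rw [heq])
          have hidx : pvIdx pvOpn p ≠ pvIdx pvCls c :=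
            fun h => hmismatch ((idx_eq_iff p c hp hcl).mp h)
          rw [pzlScan, if_neg hmem]
          simp only [List.headD_cons]
          rw [if_pos hidx]
          rw [List.find?_cons_of_pos (by simpa [pvClosersB] using hcl)]
        · exact absurd hsafe (by simp)

-- A's per-line step equals B's per-line step on every safe line
theorem line_step_eq (ch : String) (hsafe : pvLineSafe ch.toList [] = true) :
    ∀ (acc : Int × List Int),
    (match pzlScan ch.toList [] with
      | Sum.inl s => (acc.1 + s, acc.2)
      | Sum.inr st => (acc.1, acc.2 ++ [st.foldl (fun t p => t * 5 + pvIdx pvOpn p + 1) 0]))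
    = (let r := reduceLine ch.toList
       match r.find? (fun c => decide (c ∈ pvClosersB)) with
       | some bad => (acc.1 + (pvIllegal.get? bad).getD 0, acc.2)
       | none => (acc.1, acc.2 ++ [r.reverse.foldl (fun t c => t * 5 + (pvOpenVal.get? c).getD 0) 0])) := by
  intro acc
  set R := reduceLine ch.toList with hR
  have hscan : pzlScan ch.toList [] = pzlScan R [] := ((reduceLine_invariant ch.toList).1 []).symm
  have hRsafe : pvLineSafe R [] = true := by
    rw [hR, (reduceLine_invariant ch.toList).2 []]; exact hsafe
  have hfix := fixChar R [] (reduceLine_pairFree ch.toList)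
    (by intro p hp; simp at hp) (by simpa using hRsafe) trivial
  rw [hscan, hfix]
  cases hfind : R.find? (fun c => decide (c ∈ pvClosersB)) with
  | some bad =>
    have hcl : bad = ')' ∨ bad = ']' ∨ bad = '}' ∨ bad = '>' := by
      have := List.find?_some hfind
      simpa [pvClosersB] using this
    simp only [hfind]
    simp [score_eq bad hcl]
  | none =>
    have hall : ∀ c ∈ R, (pvCloseOf c).isSome = true :=
      noCloser_allOpen R [] hRsafe
        (fun x hx => by simpa using List.find?_eq_none.mp hfind x hx)
    have hfold : R.reverse.foldl (fun t p => t * 5 + pvIdx pvOpn p + 1) 0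
        = R.reverse.foldl (fun t c => t * 5 + (pvOpenVal.get? c).getD 0) 0 := by
      apply PySem.List.foldl_congr_mem
      intro t x hx
      rw [add_assoc, openval_eq x (hall x (List.mem_reverse.mp hx))]
    simp only [hfind]
    simp [hfold]

-- ===== VERDICT (by name: the statement is the Claim_ definition above) =====
theorem pzl_spec : Claim_equal_pzl := by
  intro chs _ hpre
  obtain ⟨hsafe, -⟩ := hpre
  unfold Spec_pzl pzl pzl_alt
  have : chs.foldl (fun (acc : Int × List Int) ch =>
      match pzlScan ch.toList [] with
      | Sum.inl s => (acc.1 + s, acc.2)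
      | Sum.inr st => (acc.1, acc.2 ++ [st.foldl (fun t p => t * 5 + pvIdx pvOpn p + 1) 0])) (0, [])
    = chs.foldl (fun (acc : Int × List Int) ch =>
      let r := reduceLine ch.toList
      match r.find? (fun c => decide (c ∈ pvClosersB)) with
      | some bad => (acc.1 + (pvIllegal.get? bad).getD 0, acc.2)
      | none => (acc.1, acc.2 ++ [r.reverse.foldl (fun t c => t * 5 + (pvOpenVal.get? c).getD 0) 0])) (0, []) := by
    apply PySem.List.foldl_congr_mem
    intro acc ch hch
    exact line_step_eq ch (hsafe ch hch) acc
  rw [this]
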